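-- pv_equiv track=rewrite | github.com/MattKeane/advent2022 | 03/part2/solution.py | get_common_letter
-- ===== SOURCE A (Python) =====
-- def get_common_letter(rucksack1, rucksack2, rucksack3):
--     first_contents = {}
--     for letter in rucksack1:
--         first_contents[letter] = True
--     first_and_second_contents = {}
--     for letter in rucksack2:
--         if first_contents.get(letter):
--             first_and_second_contents[letter] = True
--     for letter in rucksack3:
--         if first_and_second_contents.get(letter):
--             return letter
-- ===== SOURCE B (Python) =====
-- def get_common_letter(rucksack1, rucksack2, rucksack3):
--     common = set(rucksack3) & set(rucksack1) & set(rucksack2)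
--     if not common:
--         return None
--     return min(common, key=rucksack3.index)
-- ===== Notes on version B (the rewrite author's own statement) =====
-- stated objective: alternative
-- what changed: Replaces A's staged dict-building passes and early-return scan with a set-intersection formulation: compute the set of letters common to all three rucksacks, then select the one with the minimal first index in rucksack3 via min(key=rucksack3.index); no scan of rucksack3 with an early return remains.
import Mathlib
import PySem

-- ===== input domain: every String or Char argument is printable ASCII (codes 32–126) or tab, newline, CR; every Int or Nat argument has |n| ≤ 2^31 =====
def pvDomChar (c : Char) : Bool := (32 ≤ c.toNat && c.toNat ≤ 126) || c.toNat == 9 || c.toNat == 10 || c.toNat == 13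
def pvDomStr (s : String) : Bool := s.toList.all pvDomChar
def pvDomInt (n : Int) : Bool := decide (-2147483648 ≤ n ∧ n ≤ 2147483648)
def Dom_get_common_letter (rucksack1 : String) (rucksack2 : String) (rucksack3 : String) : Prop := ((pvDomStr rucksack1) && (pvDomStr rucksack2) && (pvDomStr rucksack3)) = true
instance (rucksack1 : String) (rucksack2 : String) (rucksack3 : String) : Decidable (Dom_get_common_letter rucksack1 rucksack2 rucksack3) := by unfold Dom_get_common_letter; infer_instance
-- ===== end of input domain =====

-- B replaces A's staged dict tables and early-return scan by a set-intersection
-- formulation: intersect the three letter sets, then pick the member with minimal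
-- first index in rucksack3 (objective: alternative; same result, different algorithm).


-- ===== PORT A =====
-- the final 'for letter in rucksack3: if …: return letter' loop (falls off the end → none)
def get_common_letter_findA (both : PySem.Dict Char Bool) : List Char → Option String
  | [] => none
  | c :: cs =>
      if (both.getD c false) = true then some (String.ofList [c])
      else get_common_letter_findA both cs

def get_common_letter (rucksack1 : String) (rucksack2 : String) (rucksack3 : String) : Option String :=
  -- first_contents = {}; for letter in rucksack1: first_contents[letter] = True
  let first_contents : PySem.Dict Char Bool :=
    rucksack1.toList.foldl (fun d c => d.insert c true) PySem.Dict.empty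
  -- first_and_second_contents = {}; for letter in rucksack2: if first_contents.get(letter): …[letter] = True
  let first_and_second_contents : PySem.Dict Char Bool :=
    rucksack2.toList.foldl
      (fun d c => if (first_contents.getD c false) = true then d.insert c true else d)
      PySem.Dict.empty
  get_common_letter_findA first_and_second_contents rucksack3.toList

-- ===== PORT B =====
-- common = set(rucksack3) & set(rucksack1) & set(rucksack2); if not common: return None;
-- return min(common, key=rucksack3.index).  The key rucksack3.index(c) never raises here
-- (every member of common occurs in rucksack3), so '(index? …).getD 0' is exact; the key is
-- injective on common (distinct chars have distinct first indices), so min over the set is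
-- independent of iteration order.
def get_common_letter_alt (rucksack1 : String) (rucksack2 : String) (rucksack3 : String) : Option String :=
  let common : PySem.Set Char :=
    PySem.Set.inter (PySem.Set.inter (PySem.Set.ofList rucksack3.toList) rucksack1.toList)
      rucksack2.toList
  if common = [] then none
  else
    (PySem.List.min? common
      (fun c => (PySem.List.index? rucksack3.toList c).getD 0)).map (fun c => String.ofList [c])

-- ===== PRECONDITION & SPEC =====
def Spec_get_common_letter (rucksack1 : String) (rucksack2 : String) (rucksack3 : String) (out : Option String) : Prop := out = get_common_letter_alt rucksack1 rucksack2 rucksack3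
instance (rucksack1 : String) (rucksack2 : String) (rucksack3 : String) (out : Option String) : Decidable (Spec_get_common_letter rucksack1 rucksack2 rucksack3 out) := by unfold Spec_get_common_letter; infer_instance

-- ===== CLAIM (what is proved, stated in full; the proofs are below) =====
def Claim_equal_get_common_letter : Prop := ∀ (rucksack1 : String) (rucksack2 : String) (rucksack3 : String), Dom_get_common_letter rucksack1 rucksack2 rucksack3 → Spec_get_common_letter rucksack1 rucksack2 rucksack3 (get_common_letter rucksack1 rucksack2 rucksack3)

-- ===== LEMMAS AND PROOFS =====

-- the first dict records exactly membership in rucksack1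
theorem getD_firstDict (l : List Char) (d : PySem.Dict Char Bool) (x : Char) :
    (l.foldl (fun d c => d.insert c true) d).getD x false
      = (d.getD x false || decide (x ∈ l)) := by
  induction l generalizing d with
  | nil => simp
  | cons c cs ih =>
      simp only [List.foldl_cons, ih, PySem.Dict.getD_insert, List.mem_cons]
      by_cases hx : x = c <;> simp [hx]

-- the second dict records membership in rucksack2 ∧ rucksack1
theorem getD_secondDict (d1 : PySem.Dict Char Bool) (l : List Char)
    (d : PySem.Dict Char Bool) (x : Char) :
    (l.foldl (fun d c => if (d1.getD c false) = true then d.insert c true else d) d).getD x false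
      = (d.getD x false || (decide (x ∈ l) && d1.getD x false)) := by
  induction l generalizing d with
  | nil => simp
  | cons c cs ih =>
      simp only [List.foldl_cons]
      by_cases hc : (d1.getD c false) = true
      · rw [if_pos hc, ih]
        simp only [PySem.Dict.getD_insert, List.mem_cons]
        by_cases hx : x = c <;> simp [hx, hc]
      · rw [if_neg hc, ih]
        simp only [List.mem_cons]
        by_cases hx : x = c
        · subst hx
          simp [Bool.eq_false_iff.mpr hc]
        · simp [hx]

-- A's final loop is find? with the combined-membership predicate
theorem findA_eq_find? (both : PySem.Dict Char Bool) (l1 l2 : List Char)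
    (hboth : ∀ x, both.getD x false = (decide (x ∈ l1) && decide (x ∈ l2))) (l3 : List Char) :
    get_common_letter_findA both l3
      = (l3.find? (fun c => decide (c ∈ l1) && decide (c ∈ l2))).map (fun c => String.ofList [c]) := by
  induction l3 with
  | nil => rfl
  | cons c cs ih =>
      simp only [get_common_letter_findA, hboth c, List.find?_cons]
      by_cases h : (decide (c ∈ l1) && decide (c ∈ l2)) = true
      · simp [h]
      · simp [h, ih]

-- membership in B's intersection set
theorem mem_common (l1 l2 l3 : List Char) (x : Char) :
    x ∈ PySem.Set.inter (PySem.Set.inter (PySem.Set.ofList l3) l1) l2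
      ↔ x ∈ l3 ∧ x ∈ l1 ∧ x ∈ l2 := by
  simp [PySem.Set.mem_inter, PySem.Set.mem_ofList, and_assoc]

-- first-match minimality: find? hits the element with the least first index
theorem idxOf_find?_le (q : Char → Bool) (l : List Char) (c : Char)
    (hf : l.find? q = some c) :
    ∀ m ∈ l, q m = true → l.idxOf c ≤ l.idxOf m := by
  induction l with
  | nil => simp at hf
  | cons a t ih =>
      intro m hm hq
      cases ha : q a with
      | true =>
          rw [List.find?_cons_of_pos (h := ha)] at hf
          cases hf
          simp [List.idxOf_cons_self]
      | false =>
          rw [List.find?_cons_of_neg (h := by simp [ha])] at hf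
          have hc : c ∈ t := List.mem_of_find?_eq_some hf
          have hca : c ≠ a := by
            intro h; subst h; exact absurd (List.find?_some hf) (by simp [ha])
          have hma : m ≠ a := by
            intro h; subst h; exact absurd hq (by simp [ha])
          have hm' : m ∈ t := by
            rcases List.mem_cons.mp hm with h | h
            · exact absurd h hma
            · exact h
          rw [List.idxOf_cons_ne _ hca.symm, List.idxOf_cons_ne _ hma.symm]
          exact Nat.succ_le_succ (ih hf m hm' hq)

-- the key used by B equals idxOf for members of rucksack3
theorem key_eq_idxOf (l3 : List Char) (x : Char) (hx : x ∈ l3) :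
    (PySem.List.index? l3 x).getD 0 = l3.idxOf x := by
  rw [PySem.List.index?_eq_idxOf?]
  cases h : l3.idxOf? x with
  | none => exact absurd hx (List.idxOf?_eq_none_iff.mp h)
  | some k =>
      have := List.idxOf_eq_getD_idxOf? x l3
      rw [h] at this
      simp [this]

-- distinct members of l3 have distinct first indices
theorem idxOf_inj (l3 : List Char) (x y : Char) (hx : x ∈ l3) (hy : y ∈ l3)
    (h : l3.idxOf x = l3.idxOf y) : x = y := by
  have h1 : l3[l3.idxOf x]'(List.idxOf_lt_length_of_mem hx) = x := List.getElem_idxOf _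
  have h2 : l3[l3.idxOf y]'(List.idxOf_lt_length_of_mem hy) = y := List.getElem_idxOf _
  rw [← h1, ← h2]
  simp_rw [h]

-- ===== VERDICT (by name: the statement is the Claim_ definition above) =====
theorem get_common_letter_spec : Claim_equal_get_common_letter := by
  intro r1 r2 r3 _
  unfold Spec_get_common_letter get_common_letter get_common_letter_alt
  set l1 := r1.toList with hl1
  set l2 := r2.toList with hl2
  set l3 := r3.toList with hl3
  have hboth : ∀ x,
      (l2.foldl (fun d c => if ((l1.foldl (fun d c => d.insert c true)
          PySem.Dict.empty).getD c false) = true then d.insert c true else d)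
        PySem.Dict.empty).getD x false
      = (decide (x ∈ l1) && decide (x ∈ l2)) := by
    intro x
    rw [getD_secondDict, getD_firstDict]
    simp [Bool.and_comm]
  rw [findA_eq_find? _ l1 l2 hboth l3]
  set common : List Char :=
    PySem.Set.inter (PySem.Set.inter (PySem.Set.ofList l3) l1) l2 with hcom
  cases hf : l3.find? (fun c => decide (c ∈ l1) && decide (c ∈ l2)) with
  | none =>
      have hnone : ∀ m ∈ l3, ¬ ((decide (m ∈ l1) && decide (m ∈ l2)) = true) :=
        List.find?_eq_none.mp hf
      have hempty : common = [] := by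
        rw [List.eq_nil_iff_forall_not_mem]
        intro x hx
        rcases (mem_common l1 l2 l3 x).mp (hcom ▸ hx) with ⟨h3, h1, h2⟩
        exact hnone x h3 (by simp [h1, h2])
      simp [hempty]
  | some c =>
      have hqc := List.find?_some hf
      have hc3 : c ∈ l3 := List.mem_of_find?_eq_some hf
      have hc1 : c ∈ l1 := by simpa using (Bool.and_eq_true _ _ |>.mp hqc).1
      have hc2 : c ∈ l2 := by simpa using (Bool.and_eq_true _ _ |>.mp hqc).2
      have hcmem : c ∈ common := (mem_common l1 l2 l3 c).mpr ⟨hc3, hc1, hc2⟩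
      have hne : common ≠ [] := fun h => by simp [h] at hcmem
      rw [if_neg hne]
      cases hmin : PySem.List.min? common
          (fun c => (PySem.List.index? l3 c).getD 0) with
      | none => exact absurd ((PySem.List.min?_eq_none_iff _ _).mp hmin) hne
      | some m =>
          have hmmem : m ∈ common := PySem.List.min?_mem hmin
          rcases (mem_common l1 l2 l3 m).mp hmmem with ⟨hm3, hm1, hm2⟩
          have hle1 : l3.idxOf m ≤ l3.idxOf c := by
            have := PySem.List.min?_isMin hmin c hcmem
            rwa [key_eq_idxOf l3 m hm3, key_eq_idxOf l3 c hc3] at this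
          have hle2 : l3.idxOf c ≤ l3.idxOf m :=
            idxOf_find?_le _ l3 c hf m hm3 (by simp [hm1, hm2])
          have : m = c := idxOf_inj l3 m c hm3 hc3 (Nat.le_antisymm hle1 hle2)
          simp [this]
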